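-- pv_equiv track=rewrite | github.com/meltyli/digit-occurances-in-mfa-codes | generate mfa codes.py | analyze_code_patterns
-- ===== SOURCE A (Python) =====
-- from typing import Dict, List, Tuple
--
-- def analyze_code_patterns(codes: List[str]) -> Dict[str, int]:
--     """
--     Analyze patterns in the generated codes
--
--     Args:
--         codes: List of generated MFA codes
--
--     Returns:
--         Dictionary containing various pattern statistics
--     """
--     patterns = {
--         'total_codes': len(codes),
--         'unique_codes': len(set(codes)),
--         'codes_with_repeating_digits': sum(1 for code in codes if any(code.count(d) > 1 for d in code)),
--         'codes_starting_with_zero': sum(1 for code in codes if code.startswith('0')),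
--     }
--
--     return patterns
-- ===== SOURCE B (Python) =====
-- def analyze_code_patterns(codes):
--     """Frequency-table re-implementation: build a code->multiplicity table once,
--     then compute every statistic by one walk over the DISTINCT codes, weighting
--     each per-code test by its multiplicity."""
--     freq = {}
--     for code in codes:
--         freq[code] = freq.get(code, 0) + 1
--     total = 0
--     repeating = 0
--     zero = 0
--     for code, k in freq.items():
--         total += k
--         if len(set(code)) != len(code):
--             repeating += k
--         if code.startswith('0'):
--             zero += k
--     return {
--         'total_codes': total,
--         'unique_codes': len(freq),
--         'codes_with_repeating_digits': repeating,
--         'codes_starting_with_zero': zero,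
--     }
-- ===== Notes on version B (the rewrite author's own statement) =====
-- stated objective: faster
-- what changed: Replaces A's four independent passes over the code list with a frequency table (code -> multiplicity) built once, from which every statistic is derived in one walk over the DISTINCT codes, weighting each per-code test by its multiplicity and computing the total as the sum of multiplicities; the duplicate-digit test becomes len(set(code)) != len(code) instead of A's per-character count scan (per-code work runs once per distinct code, and the quadratic count scan is gone).
import Mathlib
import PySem

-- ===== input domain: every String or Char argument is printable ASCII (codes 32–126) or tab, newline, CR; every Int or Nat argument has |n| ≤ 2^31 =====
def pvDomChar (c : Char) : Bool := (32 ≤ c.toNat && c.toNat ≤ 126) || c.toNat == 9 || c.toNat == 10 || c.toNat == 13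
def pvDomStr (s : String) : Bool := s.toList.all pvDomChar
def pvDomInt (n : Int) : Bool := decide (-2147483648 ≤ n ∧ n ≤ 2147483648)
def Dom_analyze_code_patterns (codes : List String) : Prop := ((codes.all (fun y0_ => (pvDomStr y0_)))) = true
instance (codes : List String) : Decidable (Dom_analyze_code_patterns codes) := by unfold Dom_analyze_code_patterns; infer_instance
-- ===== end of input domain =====

-- B builds a code→multiplicity table once and derives every statistic in one walk over the
-- DISTINCT codes, weighting each per-code test by its multiplicity (measured faster in a timing run).

-- ===== PORT A =====
def analyze_code_patterns (codes : List String) : List (String × Int) :=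
  [("total_codes", PySem.List.len codes),
   ("unique_codes", PySem.List.len (PySem.Set.ofList codes)),
   ("codes_with_repeating_digits",
     (codes.map (fun code =>
       if code.toList.any (fun d => 1 < PySem.Chars.count code.toList [d]) then (1 : Int) else 0)).sum),
   ("codes_starting_with_zero",
     (codes.map (fun code => if PySem.Str.startswith code "0" then (1 : Int) else 0)).sum)]

-- ===== PORT B =====
def analyze_code_patterns_alt (codes : List String) : List (String × Int) :=
  let freq := codes.foldl (fun d code => d.insert code (d.getD code 0 + 1)) PySem.Dict.empty
  let st := freq.items.foldl
    (fun (st : Int × Int × Int) p =>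
      (st.1 + p.2,
       st.2.1 + (if PySem.List.len (PySem.Set.ofList p.1.toList) ≠ PySem.List.len p.1.toList then p.2 else 0),
       st.2.2 + (if PySem.Str.startswith p.1 "0" then p.2 else 0)))
    (0, 0, 0)
  [("total_codes", st.1),
   ("unique_codes", PySem.List.len freq.keys),
   ("codes_with_repeating_digits", st.2.1),
   ("codes_starting_with_zero", st.2.2)]

-- ===== PRECONDITION & SPEC =====
def Spec_analyze_code_patterns (codes : List String) (out : List (String × Int)) : Prop := out = analyze_code_patterns_alt codes
instance (codes : List String) (out : List (String × Int)) : Decidable (Spec_analyze_code_patterns codes out) := by unfold Spec_analyze_code_patterns; infer_instance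

-- ===== CLAIM (what is proved, stated in full; the proofs are below) =====
def Claim_equal_analyze_code_patterns : Prop := ∀ (codes : List String), Dom_analyze_code_patterns codes → Spec_analyze_code_patterns codes (analyze_code_patterns codes)

-- ===== LEMMAS AND PROOFS =====

-- str.count with a single-character needle is plain element counting.
theorem chars_count_go_single (d : Char) : ∀ (l : List Char) (fuel acc : Nat),
    l.length ≤ fuel → PySem.Chars.count.go [d] fuel l acc = acc + l.count d := by
  intro l
  induction l with
  | nil => intro fuel acc _; cases fuel <;> simp [PySem.Chars.count.go]
  | cons c t ih =>
    intro fuel acc h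
    cases fuel with
    | zero => simp at h
    | succ f =>
      simp only [PySem.Chars.count.go]
      by_cases hc : d = c
      · subst hc
        simp only [List.isPrefixOf, BEq.rfl, Bool.and_self, if_true,
          List.length_singleton, List.drop_one, List.tail_cons]
        rw [ih f (acc + 1) (by simpa using h)]
        simp
        omega
      · have hpre : ([d].isPrefixOf (c :: t)) = false := by
          simp [List.isPrefixOf]
          exact hc
        rw [hpre]
        simp only [Bool.false_eq_true, if_false]
        rw [ih f acc (by simp at h; omega)]
        simp [List.count_cons]
        exact fun h' => hc h'.symm

theorem chars_count_single (cs : List Char) (d : Char) :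
    PySem.Chars.count cs [d] = cs.count d := by
  simp [PySem.Chars.count]
  simpa using chars_count_go_single d cs cs.length 0 le_rfl

-- PySem.Set.ofList is a permutation of Mathlib's dedup.
theorem ofList_perm_dedup {α : Type} [DecidableEq α] (xs : List α) :
    (PySem.Set.ofList xs).Perm xs.dedup := by
  apply List.perm_of_nodup_nodup_toFinset_eq (PySem.Set.nodup_ofList xs) (List.nodup_dedup xs)
  ext a; simp [PySem.Set.mem_ofList]

-- A's per-code duplicate test agrees with B's length-of-set test.
theorem repeat_test_eq (cs : List Char) :
    (cs.any (fun d => 1 < PySem.Chars.count cs [d]))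
      = decide (PySem.List.len (PySem.Set.ofList cs) ≠ PySem.List.len cs) := by
  simp only [chars_count_single, PySem.List.len_eq, (ofList_perm_dedup cs).length_eq]
  rw [Bool.eq_iff_iff]
  simp only [List.any_eq_true, decide_eq_true_eq]
  constructor
  · intro ⟨d, _, hd⟩ h
    have := List.nodup_iff_count_le_one.mp
      (by
        have : cs.dedup.length = cs.length := by exact_mod_cast h
        exact (cs.dedup_sublist.eq_of_length this) ▸ cs.nodup_dedup) d
    omega
  · intro h
    by_contra hne
    push Not at hne
    apply h
    have hnd : cs.Nodup := List.nodup_iff_count_le_one.mpr (by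
      intro a
      by_cases ha : a ∈ cs
      · exact Nat.le_of_not_lt fun hlt => absurd hlt (by simpa using hne a ha)
      · simp [List.count_eq_zero_of_not_mem ha])
    rw [List.dedup_eq_self.mpr hnd]

-- dedup commutes with filter.
theorem dedup_filter {α : Type} [DecidableEq α] (p : α → Bool) (l : List α) :
    l.dedup.filter p = (l.filter p).dedup := by
  induction l with
  | nil => simp
  | cons a t ih =>
    by_cases h : a ∈ t
    · rw [List.dedup_cons_of_mem h]
      by_cases hp : p a
      · rw [List.filter_cons_of_pos hp, List.dedup_cons_of_mem (by simp [List.mem_filter, h, hp]), ih]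
      · rw [List.filter_cons_of_neg (by simpa using hp), ih]
    · rw [List.dedup_cons_of_notMem h]
      by_cases hp : p a
      · rw [List.filter_cons_of_pos hp, List.filter_cons_of_pos hp,
          List.dedup_cons_of_notMem (by simp [List.mem_filter, h]), ih]
      · rw [List.filter_cons_of_neg (by simpa using hp), List.filter_cons_of_neg (by simpa using hp), ih]

-- a sum of 'if p then weight else 0' over a list is the sum of the weights over its filter.
theorem sum_map_ite_filter {α : Type} (p : α → Bool) (c : α → Int) (xs : List α) :
    (xs.map (fun k => if p k then c k else 0)).sum = ((xs.filter p).map c).sum := by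
  induction xs with
  | nil => simp
  | cons a t ih => by_cases hp : p a <;> simp [hp, ih]

-- THE COUNTING IDENTITY: summing multiplicities of the distinct codes satisfying p counts
-- the codes satisfying p.
theorem sum_count_over_set (p : String → Bool) (l : List String) :
    ((PySem.Set.ofList l).map (fun k => if p k then (l.count k : Int) else 0)).sum
      = ((l.map (fun code => if p code then (1 : Int) else 0)).sum) := by
  rw [((ofList_perm_dedup l).map (fun k => if p k then (l.count k : Int) else 0)).sum_eq]
  rw [sum_map_ite_filter, dedup_filter, PySem.List.sum_map_ite_one_zero]
  have : ((l.filter p).dedup.map (fun k => ((l.count k : Nat) : Int))).sum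
      = (((l.filter p).dedup.map (fun k => l.count k)).sum : Nat) := by
    rw [Nat.cast_list_sum, List.map_map]; rfl
  rw [this]
  congr 1
  have hcongr : (l.filter p).dedup.map (fun k => l.count k)
      = (l.filter p).dedup.map (fun k => (l.filter p).count k) := by
    apply List.map_congr_left
    intro k hk
    have hpk : p k = true := (List.mem_filter.mp (List.mem_dedup.mp hk)).2
    rw [List.count_filter]; simp [hpk]
  rw [hcongr, List.sum_map_count_dedup_eq_length, List.countP_eq_length_filter]

-- ===== VERDICT (by name: the statement is the Claim_ definition above) =====
theorem analyze_code_patterns_spec : Claim_equal_analyze_code_patterns := by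
  intro codes _
  unfold Spec_analyze_code_patterns analyze_code_patterns analyze_code_patterns_alt
  rw [PySem.Dict.foldl_insert_getD_add_one_eq_counter]
  dsimp only
  rw [PySem.List.foldl_prod_mk (f := fun (a : Int) (p : String × Int) => a + p.2)
    (g := fun (b : Int × Int) (p : String × Int) =>
      (b.1 + (if PySem.List.len (PySem.Set.ofList p.1.toList) ≠ PySem.List.len p.1.toList then p.2 else 0),
       b.2 + (if PySem.Str.startswith p.1 "0" then p.2 else 0)))]
  rw [PySem.List.foldl_prod_mk (f := fun (b : Int) (p : String × Int) =>
      b + (if PySem.List.len (PySem.Set.ofList p.1.toList) ≠ PySem.List.len p.1.toList then p.2 else 0))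
    (g := fun (b : Int) (p : String × Int) => b + (if PySem.Str.startswith p.1 "0" then p.2 else 0))]
  rw [PySem.List.foldl_add, PySem.List.foldl_add, PySem.List.foldl_add]
  simp only [PySem.Dict.items_counter, PySem.Dict.keys_counter, List.map_map,
    Function.comp_def, zero_add]
  congr 2
  · -- total_codes
    have h := sum_count_over_set (fun _ => true) codes
    simp only [if_true] at h
    rw [h, PySem.List.len_eq]
    simp
  congr 1
  · -- codes_with_repeating_digits
    refine congrArg (fun z => ("codes_with_repeating_digits", z)) ?_
    have h := sum_count_over_set (fun code =>
      decide (PySem.List.len (PySem.Set.ofList code.toList) ≠ PySem.List.len code.toList)) codes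
    simp only [decide_eq_true_eq] at h
    rw [h]
    apply congrArg List.sum
    apply List.map_congr_left
    intro code _
    rw [repeat_test_eq code.toList]
    simp
  · -- codes_starting_with_zero
    refine congrArg (fun z => [("codes_starting_with_zero", z)]) ?_
    exact (sum_count_over_set (fun code => PySem.Str.startswith code "0") codes).symm
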